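-- pv_equiv track=rewrite | github.com/luanaferreir4/Introduction_to_Python_Programming | Exercicios/Loops/ex04.py | entre_intervalos
-- ===== SOURCE A (Python) =====
-- def entre_intervalos(numeros):
--     qntd_intervalos = {'0-25': 0, '26-50': 0, '51-75': 0, '76-100': 0}
--
--     for numero in numeros:
--         if numero <= 25:
--             qntd_intervalos['0-25'] += 1
--         elif numero <= 50:
--             qntd_intervalos['26-50'] += 1
--         elif numero <= 75:
--             qntd_intervalos['51-75'] += 1
--         elif numero <= 100:
--             qntd_intervalos['76-100'] += 1
--         else:
--             return 'Nesse algoritmo apenas são aceitos números de 0 a 100.'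
--     return qntd_intervalos
-- ===== SOURCE B (Python) =====
-- def entre_intervalos(numeros):
--     if any(n > 100 for n in numeros):
--         return 'Nesse algoritmo apenas são aceitos números de 0 a 100.'
--     contagens = [0, 0, 0, 0]
--     for n in numeros:
--         idx = (n > 25) + (n > 50) + (n > 75)
--         contagens[idx] += 1
--     return dict(zip(('0-25', '26-50', '51-75', '76-100'), contagens))
-- ===== Notes on version B (the rewrite author's own statement) =====
-- stated objective: alternative
-- what changed: Replaces the four-branch if/elif ladder updating a dict in place by a one-shot >100 guard plus arithmetic threshold binning: the bucket index is the sum of the boolean comparisons (n>25)+(n>50)+(n>75) into a plain counts list, with the dict built once at the end via dict(zip(...)).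
import Mathlib
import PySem

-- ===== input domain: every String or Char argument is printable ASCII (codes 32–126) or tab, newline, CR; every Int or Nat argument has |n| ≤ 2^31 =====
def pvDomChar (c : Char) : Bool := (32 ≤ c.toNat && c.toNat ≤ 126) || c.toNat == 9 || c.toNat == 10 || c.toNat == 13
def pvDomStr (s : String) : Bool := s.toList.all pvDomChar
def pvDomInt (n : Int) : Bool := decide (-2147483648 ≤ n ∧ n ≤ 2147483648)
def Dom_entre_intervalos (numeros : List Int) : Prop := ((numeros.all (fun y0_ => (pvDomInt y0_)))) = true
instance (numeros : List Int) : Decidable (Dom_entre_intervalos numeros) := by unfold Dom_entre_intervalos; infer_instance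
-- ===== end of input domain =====

-- B replaces A's if/elif ladder over an in-place dict by arithmetic threshold binning into a
-- counts list zipped with the keys at the end (alternative decomposition, same O(n) cost).


-- ===== PORT A =====
-- loop over numeros with the dict as state; the final 'else' is Python's early string return
-- (not a value of the declared type, excluded by Pre_), rendered as [].
def entreLoopA : List Int → PySem.Dict String Int → List (String × Int)
  | [], d => d.items
  | n :: rest, d =>
    if n ≤ 25 then entreLoopA rest (d.modify "0-25" 0 (· + 1))
    else if n ≤ 50 then entreLoopA rest (d.modify "26-50" 0 (· + 1))
    else if n ≤ 75 then entreLoopA rest (d.modify "51-75" 0 (· + 1))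
    else if n ≤ 100 then entreLoopA rest (d.modify "76-100" 0 (· + 1))
    else []

def entre_intervalos (numeros : List Int) : List (String × Int) :=
  entreLoopA numeros (PySem.Dict.mk [("0-25", 0), ("26-50", 0), ("51-75", 0), ("76-100", 0)])

-- ===== PORT B =====
-- bucket index = (n>25)+(n>50)+(n>75); counts list updated in place, dict(zip(keys, counts)) at the end.
def entre_intervalos_alt (numeros : List Int) : List (String × Int) :=
  if numeros.any (fun n => decide (100 < n)) then []  -- Python returns the error string here; excluded by Pre_
  else
    let contagens := numeros.foldl
      (fun c n =>
        let idx : Nat := (if 25 < n then 1 else 0) + (if 50 < n then 1 else 0) + (if 75 < n then 1 else 0)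
        c.set idx (c.getD idx 0 + 1))
      [0, 0, 0, 0]
    ["0-25", "26-50", "51-75", "76-100"].zip contagens

-- ===== PRECONDITION & SPEC =====
-- Pre_ excludes lists containing an element > 100: there Python A (and B) return an error STRING,
-- which is not a value of the declared dict type.
def Pre_entre_intervalos (numeros : List Int) : Prop := ∀ n ∈ numeros, n ≤ 100
instance (numeros : List Int) : Decidable (Pre_entre_intervalos numeros) := by unfold Pre_entre_intervalos; infer_instance
def pvWitness_entre_intervalos : List Int := [0, 25, 26, 77, 100, -3]

def Spec_entre_intervalos (numeros : List Int) (out : List (String × Int)) : Prop := out = entre_intervalos_alt numeros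
instance (numeros : List Int) (out : List (String × Int)) : Decidable (Spec_entre_intervalos numeros out) := by unfold Spec_entre_intervalos; infer_instance

-- ===== CLAIM (what is proved, stated in full; the proofs are below) =====
def Claim_equal_entre_intervalos : Prop := ∀ (numeros : List Int), Dom_entre_intervalos numeros → Pre_entre_intervalos numeros → Spec_entre_intervalos numeros (entre_intervalos numeros)

-- ===== LEMMAS AND PROOFS =====

-- loop invariant: A's dict-of-four state corresponds to B's four counts.
theorem entreLoop_eq (numeros : List Int) (h : ∀ n ∈ numeros, n ≤ 100) :
    ∀ (a b c e : Int),
      entreLoopA numeros (PySem.Dict.mk [("0-25", a), ("26-50", b), ("51-75", c), ("76-100", e)]) =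
      ["0-25", "26-50", "51-75", "76-100"].zip
        (numeros.foldl
          (fun cl n =>
            let idx : Nat := (if 25 < n then 1 else 0) + (if 50 < n then 1 else 0) + (if 75 < n then 1 else 0)
            cl.set idx (cl.getD idx 0 + 1))
          [a, b, c, e]) := by
  induction numeros with
  | nil => intro a b c e; simp [entreLoopA, List.zip]
  | cons n rest ih =>
    intro a b c e
    have hn : n ≤ 100 := h n (List.mem_cons_self ..)
    have hrest : ∀ m ∈ rest, m ≤ 100 := fun m hm => h m (List.mem_cons_of_mem _ hm)
    by_cases h1 : n ≤ 25
    · simpa [entreLoopA, h1, PySem.Dict.modify, PySem.Dict.get?, PySem.Dict.insert,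
        show ¬ (25 : Int) < n by omega, show ¬ (50 : Int) < n by omega,
        show ¬ (75 : Int) < n by omega] using ih hrest (a + 1) b c e
    · by_cases h2 : n ≤ 50
      · simpa [entreLoopA, h1, h2, PySem.Dict.modify, PySem.Dict.get?, PySem.Dict.insert,
          show (25 : Int) < n by omega, show ¬ (50 : Int) < n by omega,
          show ¬ (75 : Int) < n by omega] using ih hrest a (b + 1) c e
      · by_cases h3 : n ≤ 75
        · simpa [entreLoopA, h1, h2, h3, PySem.Dict.modify, PySem.Dict.get?, PySem.Dict.insert,
            show (25 : Int) < n by omega, show (50 : Int) < n by omega,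
            show ¬ (75 : Int) < n by omega] using ih hrest a b (c + 1) e
        · simpa [entreLoopA, h1, h2, h3, hn, PySem.Dict.modify, PySem.Dict.get?, PySem.Dict.insert,
            show (25 : Int) < n by omega, show (50 : Int) < n by omega,
            show (75 : Int) < n by omega] using ih hrest a b c (e + 1)

-- ===== VERDICT (by name: the statement is the Claim_ definition above) =====
theorem entre_intervalos_spec : Claim_equal_entre_intervalos := by
  intro numeros _ hpre
  unfold Spec_entre_intervalos entre_intervalos entre_intervalos_alt
  have hno : numeros.any (fun n => decide (100 < n)) = false := by
    simp only [List.any_eq_false]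
    intro x hx
    simpa using hpre x hx
  rw [hno]
  simpa using entreLoop_eq numeros hpre 0 0 0 0
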